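-- pv_equiv track=rewrite | github.com/sujin403/programmers | 2단계/sale_event.py | solution
-- ===== SOURCE A (Python) =====
-- def solution(want, number, discount):
--     answer = 0
--     for i in range(len(discount)) :
--         # 10일간격으로 담아 원하는 수량과 비교
--         d10 = discount[i:i + 10]
--         a = 0
--         for j in range(len(want)) :
--             if d10.count(want[j]) < number[j] :
--                 a = 1
--                 break
--         if a == 0 :
--             answer +=1
--     return answer
-- ===== SOURCE B (Python) =====
-- def solution(want, number, discount):
--     n = len(discount)
--     # one requirement per distinct item: the largest needed quantity wins
--     req = {}
--     for w, need in zip(want, number):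
--         req[w] = max(req.get(w, need), need)
--     good = [True] * n
--     alive = n
--     for w, need in req.items():
--         if alive == 0:
--             break
--         # prefix counts of w over discount; window count = O(1) difference
--         pref = [0] * (n + 1)
--         for k, item in enumerate(discount):
--             pref[k + 1] = pref[k] + (item == w)
--         for i in range(n):
--             if good[i] and pref[min(i + 10, n)] - pref[i] < need:
--                 good[i] = False
--                 alive -= 1
--     return alive
-- ===== Notes on version B (the rewrite author's own statement) =====
-- stated objective: alternative
-- what changed: B inverts the loop nesting: it first collapses the requirements into a dict keeping the largest needed quantity per distinct item, then for each such requirement builds one prefix-count array over the whole discount list and marks failing window starts in a shared boolean array, with an alive counter of surviving windows that stops the requirement loop early; A instead slices each window and rescans it with list.count per requirement with a break flag.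
-- outside the precondition, e.g. on solution(['a'], [], ['x']): A raises IndexError, B returns 1; on solution(['a', 'b'], [5], ['x']): A returns 0, B returns 0
import Mathlib
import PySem

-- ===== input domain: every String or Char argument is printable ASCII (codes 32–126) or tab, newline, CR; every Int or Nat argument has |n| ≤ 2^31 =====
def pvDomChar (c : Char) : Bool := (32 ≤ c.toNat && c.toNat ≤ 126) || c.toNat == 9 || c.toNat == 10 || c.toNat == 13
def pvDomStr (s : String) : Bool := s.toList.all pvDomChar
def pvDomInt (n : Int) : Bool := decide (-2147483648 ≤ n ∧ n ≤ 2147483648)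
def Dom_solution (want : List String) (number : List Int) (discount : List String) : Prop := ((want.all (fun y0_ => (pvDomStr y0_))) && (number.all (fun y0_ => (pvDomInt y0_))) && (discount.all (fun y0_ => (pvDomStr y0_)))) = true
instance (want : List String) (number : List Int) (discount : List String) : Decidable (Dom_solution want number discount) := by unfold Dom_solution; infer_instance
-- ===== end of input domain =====

-- B inverts the loop nesting: one prefix-count array per requirement marks failing window
-- starts in a shared boolean array, with a live-window counter that stops the requirement
-- loop early; A slices and rescans every window per requirement (objective: alternative).

-- ===== PORT A =====
-- inner loop 'for j in range(len(want)): if d10.count(want[j]) < number[j]: a = 1; break'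
-- transliterated as simultaneous recursion on want/number; the '_ :: _, []' case is where
-- Python raises IndexError (outside Pre_solution, unclaimed there).
def checkA (want : List String) (number : List Int) (d10 : List String) : Int :=
  match want, number with
  | [], _ => 0
  | w :: ws, n :: ns => if (d10.count w : Int) < n then 1 else checkA ws ns d10
  | _ :: _, [] => 0

def solution (want : List String) (number : List Int) (discount : List String) : Int :=
  (List.range discount.length).foldl (fun (answer : Int) (i : Nat) =>
    let d10 := PySem.List.slice discount (some (i : Int)) (some ((i : Int) + 10))
    let a := checkA want number d10
    if a = 0 then answer + 1 else answer) 0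

-- ===== PORT B =====
-- 'pref = [0]*(n+1); for k, item in enumerate(discount): pref[k+1] = pref[k] + (item == w)'
-- built front to back by structural recursion carrying the running count.
def prefB (w : String) (acc : Int) : List String → List Int
  | [] => [acc]
  | item :: rest => acc :: prefB w (acc + (if item == w then 1 else 0)) rest

-- 'for i in range(n): if good[i] and pref[min(i+10, n)] - pref[i] < need: good[i] = False; alive -= 1'
def markB (pref : List Int) (need : Int) (n : Nat) (st : List Bool × Int) : List Bool × Int :=
  (List.range n).foldl (fun st i =>
    if st.1.getD i false = true ∧ pref.getD (min (i + 10) n) 0 - pref.getD i 0 < need then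
      (st.1.set i false, st.2 - 1)
    else st) st

-- 'for w, need in zip(want, number): if alive == 0: break; …'
def loopB (discount : List String) (n : Nat) : List (String × Int) → List Bool × Int → Int
  | [], st => st.2
  | p :: ps, st =>
    if st.2 = 0 then st.2
    else loopB discount n ps (markB (prefB p.1 0 discount) p.2 n st)

-- 'req = {}; for w, need in zip(want, number): req[w] = max(req.get(w, need), need)'
def buildReq (pairs : List (String × Int)) (d : PySem.Dict String Int) : PySem.Dict String Int :=
  pairs.foldl (fun d p => d.insert p.1 (max (d.getD p.1 p.2) p.2)) d

def solution_alt (want : List String) (number : List Int) (discount : List String) : Int :=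
  loopB discount discount.length (buildReq (want.zip number) PySem.Dict.empty).items
    (List.replicate discount.length true, (discount.length : Int))

-- ===== PRECONDITION & SPEC =====
-- Pre_ excludes want longer than number with a nonempty discount: there Python A raises
-- IndexError on number[j], except when an earlier unmet requirement happens to break the
-- scan first in every window (an accident of the break flag).
def Pre_solution (want : List String) (number : List Int) (discount : List String) : Prop :=
  want.length ≤ number.length ∨ discount = []
instance (want : List String) (number : List Int) (discount : List String) : Decidable (Pre_solution want number discount) := by unfold Pre_solution; infer_instance

def pvWitness_solution : List String × List Int × List String :=
  (["a", "b"], [1, 2], ["a", "b", "b", "c"])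

def Spec_solution (want : List String) (number : List Int) (discount : List String) (out : Int) : Prop := out = solution_alt want number discount
instance (want : List String) (number : List Int) (discount : List String) (out : Int) : Decidable (Spec_solution want number discount out) := by unfold Spec_solution; infer_instance

-- ===== CLAIM (what is proved, stated in full; the proofs are below) =====
def Claim_equal_solution : Prop := ∀ (want : List String) (number : List Int) (discount : List String), Dom_solution want number discount → Pre_solution want number discount → Spec_solution want number discount (solution want number discount)

-- ===== LEMMAS AND PROOFS =====

-- proof-side model of one requirement pass without the alive counter
def fullMark (pref : List Int) (need : Int) (n : Nat) (good : List Bool) : List Bool :=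
  (List.range n).foldl (fun g i =>
    if pref.getD (min (i + 10) n) 0 - pref.getD i 0 < need then g.set i false else g) good

-- prefB entry j is the running start plus the count of w among the first j items
lemma prefB_getD (w : String) (a : Int) (d : List String) (j : Nat) (hj : j ≤ d.length) :
    (prefB w a d).getD j 0 = a + ((d.take j).count w : Int) := by
  induction d generalizing a j with
  | nil =>
    have : j = 0 := by simpa using hj
    subst this; simp [prefB]
  | cons x xs ih =>
    cases j with
    | zero => simp [prefB]
    | succ j =>
      simp only [prefB, List.getD_cons_succ, List.take_succ_cons, List.count_cons]
      rw [ih _ j (by simpa using hj)]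
      by_cases hx : x == w
      · simp [hx]; ring
      · simp [hx]

-- the prefix-sum difference is the count of w in the window [i, i+10)
lemma pref_diff (w : String) (d : List String) (i : Nat) (hi : i < d.length) :
    (prefB w 0 d).getD (min (i + 10) d.length) 0 - (prefB w 0 d).getD i 0
      = (((d.drop i).take 10).count w : Int) := by
  rw [prefB_getD w 0 d _ (min_le_right _ _), prefB_getD w 0 d i (le_of_lt hi)]
  have htake : d.take (min (i + 10) d.length) = d.take (i + 10) := by
    by_cases h : i + 10 ≤ d.length
    · rw [Nat.min_eq_left h]
    · rw [Nat.min_eq_right (by omega), List.take_length,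
        List.take_of_length_le (by omega)]
  rw [htake, List.take_add, List.count_append]
  push_cast; ring

-- A's break-flag scan returns 0 iff every zipped requirement is met
lemma checkA_eq_zero_iff (want : List String) (number : List Int) (d10 : List String)
    (h : want.length ≤ number.length) :
    checkA want number d10 = 0 ↔ ∀ p ∈ want.zip number, p.2 ≤ (d10.count p.1 : Int) := by
  induction want generalizing number with
  | nil => simp [checkA]
  | cons w ws ih =>
    cases number with
    | nil => simp at h
    | cons n ns =>
      simp only [checkA, List.zip_cons_cons, List.mem_cons]
      by_cases hc : (d10.count w : Int) < n
      · simp only [if_pos hc]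
        constructor
        · intro h1; omega
        · intro h1; exfalso; exact absurd (h1 (w, n) (Or.inl rfl)) (by simpa using hc)
      · simp only [if_neg hc, ih ns (by simpa using h)]
        constructor
        · rintro h1 p (rfl | hp)
          · simpa using not_lt.mp hc
          · exact h1 p hp
        · intro h1 p hp; exact h1 p (Or.inr hp)

-- setting position a of a Bool list to false, seen through getD
lemma set_getD_false (g : List Bool) (a j : Nat) :
    (g.set a false).getD j false = (g.getD j false && !(a == j)) := by
  by_cases haj : a = j
  · subst haj
    by_cases hlt : a < g.length
    · simp [List.getD_eq_getElem?_getD, List.getElem?_set_self hlt]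
    · have hnone : (g.set a false)[a]? = none := List.getElem?_eq_none (by simp; omega)
      have hnone2 : g[a]? = none := List.getElem?_eq_none (by omega)
      simp [List.getD_eq_getElem?_getD, hnone, hnone2]
  · simp [List.getD_eq_getElem?_getD, List.getElem?_set_ne haj, haj]

-- setting an already-false position changes nothing
lemma set_false_of_getD_false (g : List Bool) (i : Nat) (h : g.getD i false = false) :
    g.set i false = g := by
  apply List.ext_getElem
  · simp
  · intro j h1 h2
    by_cases hij : i = j
    · subst hij
      have : g[i] = false := by
        simpa [List.getD_eq_getElem?_getD, List.getElem?_eq_getElem h2] using h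
      simp [this, List.getElem_set_self]
    · simp [List.getElem_set_ne hij]

-- an in-range true position flips: the true-count drops by one
lemma count_true_set_false (g : List Bool) (i : Nat) (h : g.getD i false = true) :
    ((g.set i false).count true : Int) = (g.count true : Int) - 1 := by
  induction g generalizing i with
  | nil => simp at h
  | cons x xs ih =>
    cases i with
    | zero =>
      have hx : x = true := by simpa using h
      subst hx
      simp
    | succ i =>
      have h' : xs.getD i false = true := by simpa using h
      simp only [List.set_cons_succ, List.count_cons]
      push_cast
      have := ih i h'
      by_cases hx : x = true
      · simp [hx]; omega
      · simp [hx]; omega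

-- effect of the inner marking loop on one position
lemma foldl_set_false (q : Nat → Prop) [DecidablePred q] (L : List Nat) (g : List Bool) (j : Nat) :
    (L.foldl (fun g i => if q i then g.set i false else g) g).getD j false
      = (g.getD j false && !(L.contains j && decide (q j))) := by
  induction L generalizing g with
  | nil => simp
  | cons a L ih =>
    simp only [List.foldl_cons, List.contains_cons]
    by_cases hq : q a
    · rw [if_pos hq, ih, set_getD_false]
      by_cases haj : a = j
      · subst haj; simp [hq]
      · have h1 : (a == j) = false := by simp [haj]
        have h2 : (j == a) = false := by simp [Ne.symm haj]
        simp [h1, h2]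
    · rw [if_neg hq, ih]
      by_cases haj : a = j
      · subst haj; simp [hq]
      · have h2 : (j == a) = false := by simp [Ne.symm haj]
        simp [h2]

lemma foldl_set_length (q : Nat → Prop) [DecidablePred q] (L : List Nat) (g : List Bool) :
    (L.foldl (fun g i => if q i then g.set i false else g) g).length = g.length := by
  induction L generalizing g with
  | nil => rfl
  | cons a L ih => simp only [List.foldl_cons]; rw [ih]; by_cases hq : q a <;> simp [hq]

lemma fullMark_length (pref : List Int) (need : Int) (n : Nat) (g : List Bool) :
    (fullMark pref need n g).length = g.length :=
  foldl_set_length _ _ g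

lemma fullMark_getD (pref : List Int) (need : Int) (n : Nat) (g : List Bool) (j : Nat)
    (hj : j < n) :
    (fullMark pref need n g).getD j false
      = (g.getD j false && !decide (pref.getD (min (j + 10) n) 0 - pref.getD j 0 < need)) := by
  unfold fullMark
  rw [foldl_set_false (fun i => pref.getD (min (i + 10) n) 0 - pref.getD i 0 < need)]
  have : (List.range n).contains j = true := by simp [hj]
  rw [this]; simp

-- B's counted pass computes fullMark in its first component
lemma markB_fst (pref : List Int) (need : Int) (n : Nat) (g : List Bool) (a : Int) :
    (markB pref need n (g, a)).1 = fullMark pref need n g := by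
  unfold markB fullMark
  generalize List.range n = L
  induction L generalizing g a with
  | nil => rfl
  | cons i L ih =>
    simp only [List.foldl_cons]
    by_cases hc : pref.getD (min (i + 10) n) 0 - pref.getD i 0 < need
    · by_cases hg : g.getD i false = true
      · have hcond : g.getD i false = true ∧ pref.getD (min (i + 10) n) 0 - pref.getD i 0 < need :=
          ⟨hg, hc⟩
        rw [if_pos hcond, if_pos hc]
        exact ih _ _
      · have hfalse : g.getD i false = false := by simpa using hg
        have hncond : ¬(g.getD i false = true ∧
            pref.getD (min (i + 10) n) 0 - pref.getD i 0 < need) := by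
          intro hcl
          rw [hfalse] at hcl
          exact absurd hcl.1 (by simp)
        rw [if_neg hncond, if_pos hc, set_false_of_getD_false g i hfalse]
        exact ih _ _
    · have hncond : ¬(g.getD i false = true ∧
          pref.getD (min (i + 10) n) 0 - pref.getD i 0 < need) := fun h => hc h.2
      rw [if_neg hncond, if_neg hc]
      exact ih _ _

-- B's counted pass keeps the alive counter equal to the number of surviving windows
lemma markB_snd (pref : List Int) (need : Int) (n : Nat) (g : List Bool) (a : Int)
    (ha : a = (g.count true : Int)) :
    (markB pref need n (g, a)).2 = ((fullMark pref need n g).count true : Int) := by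
  unfold markB fullMark
  generalize List.range n = L
  induction L generalizing g a with
  | nil => simpa using ha
  | cons i L ih =>
    simp only [List.foldl_cons]
    by_cases hc : pref.getD (min (i + 10) n) 0 - pref.getD i 0 < need
    · by_cases hg : g.getD i false = true
      · have hcond : g.getD i false = true ∧ pref.getD (min (i + 10) n) 0 - pref.getD i 0 < need :=
          ⟨hg, hc⟩
        rw [if_pos hcond, if_pos hc]
        exact ih _ _ (by rw [ha, ← count_true_set_false g i hg])
      · have hfalse : g.getD i false = false := by simpa using hg
        have hncond : ¬(g.getD i false = true ∧
            pref.getD (min (i + 10) n) 0 - pref.getD i 0 < need) := by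
          intro hcl
          rw [hfalse] at hcl
          exact absurd hcl.1 (by simp)
        rw [if_neg hncond, if_pos hc, set_false_of_getD_false g i hfalse]
        exact ih _ _ ha
    · have hncond : ¬(g.getD i false = true ∧
          pref.getD (min (i + 10) n) 0 - pref.getD i 0 < need) := fun h => hc h.2
      rw [if_neg hncond, if_neg hc]
      exact ih _ _ ha

-- a dead board stays dead under fullMark
lemma fullMark_of_count_zero (pref : List Int) (need : Int) (n : Nat) (g : List Bool)
    (h : g.count true = 0) : fullMark pref need n g = g := by
  have hmem : true ∉ g := List.count_eq_zero.mp h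
  have hfalse : ∀ j : Nat, g.getD j false = false := by
    intro j
    rw [List.getD_eq_getElem?_getD]
    cases hv : g[j]? with
    | none => rfl
    | some b =>
      cases b
      · rfl
      · exact absurd (List.mem_of_getElem? hv) hmem
  apply List.ext_getElem
  · rw [fullMark_length]
  · intro j h1 h2
    have e1 : (fullMark pref need n g)[j] = (fullMark pref need n g).getD j false := by
      rw [List.getD_eq_getElem?_getD, List.getElem?_eq_getElem h1]; rfl
    have e2 : g[j] = g.getD j false := by
      rw [List.getD_eq_getElem?_getD, List.getElem?_eq_getElem h2]; rfl
    rw [e1, e2]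
    unfold fullMark
    rw [foldl_set_false (fun i => pref.getD (min (i + 10) n) 0 - pref.getD i 0 < need)]
    rw [hfalse j]
    simp

-- the alive-counted early-exit loop equals counting survivors of the full pass sequence
lemma loopB_eq (discount : List String) (pairs : List (String × Int)) (g : List Bool) (a : Int)
    (ha : a = (g.count true : Int)) :
    loopB discount discount.length pairs (g, a)
      = ((pairs.foldl (fun g p => fullMark (prefB p.1 0 discount) p.2 discount.length g) g).count true : Int) := by
  induction pairs generalizing g a with
  | nil => simpa [loopB] using ha
  | cons p ps ih =>
    simp only [loopB, List.foldl_cons]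
    by_cases h0 : a = 0
    · rw [if_pos h0]
      have hg0 : g.count true = 0 := by omega
      have hfold : (ps.foldl (fun g p => fullMark (prefB p.1 0 discount) p.2 discount.length g)
          (fullMark (prefB p.1 0 discount) p.2 discount.length g)) = g := by
        rw [fullMark_of_count_zero _ _ _ _ hg0]
        clear ih
        induction ps with
        | nil => rfl
        | cons q qs ihq =>
          simp only [List.foldl_cons]
          rw [fullMark_of_count_zero _ _ _ _ hg0, ihq]
      rw [hfold, ← ha, h0]
    · rw [if_neg h0]
      have := markB_fst (prefB p.1 0 discount) p.2 discount.length g a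
      have h2 := markB_snd (prefB p.1 0 discount) p.2 discount.length g a ha
      have hst : (markB (prefB p.1 0 discount) p.2 discount.length (g, a))
          = (fullMark (prefB p.1 0 discount) p.2 discount.length g,
             ((fullMark (prefB p.1 0 discount) p.2 discount.length g).count true : Int)) :=
        Prod.ext_iff.mpr ⟨this, h2⟩
      rw [hst, ih _ _ rfl]

-- aggregate effect of the outer requirement loop on one position
lemma fold_pairs_getD (discount : List String) (pairs : List (String × Int)) (g : List Bool)
    (j : Nat) (hj : j < discount.length) :
    ((pairs.foldl (fun g p => fullMark (prefB p.1 0 discount) p.2 discount.length g) g).getD j false)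
      = (g.getD j false && pairs.all (fun p =>
          !decide ((prefB p.1 0 discount).getD (min (j + 10) discount.length) 0
            - (prefB p.1 0 discount).getD j 0 < p.2))) := by
  induction pairs generalizing g with
  | nil => simp
  | cons p ps ih =>
    simp only [List.foldl_cons, List.all_cons, ih, fullMark_getD _ _ _ _ j hj,
      Bool.and_assoc]

lemma fold_pairs_length (discount : List String) (pairs : List (String × Int)) (g : List Bool) :
    (pairs.foldl (fun g p => fullMark (prefB p.1 0 discount) p.2 discount.length g) g).length
      = g.length := by
  induction pairs generalizing g with
  | nil => rfl
  | cons p ps ih => simp only [List.foldl_cons]; rw [ih, fullMark_length]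

-- the final good array is the pointwise requirement test over window starts
lemma good_eq_map (discount : List String) (pairs : List (String × Int)) :
    (pairs.foldl (fun g p => fullMark (prefB p.1 0 discount) p.2 discount.length g)
        (List.replicate discount.length true))
      = (List.range discount.length).map (fun j => pairs.all (fun p =>
          !decide ((prefB p.1 0 discount).getD (min (j + 10) discount.length) 0
            - (prefB p.1 0 discount).getD j 0 < p.2))) := by
  apply List.ext_getElem
  · rw [fold_pairs_length]; simp
  · intro j h1 h2
    have hj : j < discount.length := by
      rw [fold_pairs_length] at h1; simpa using h1
    rw [← List.getD_eq_getElem _ false h1]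
    rw [fold_pairs_getD discount pairs _ j hj]
    simp [hj]

-- the deduplicated max-requirements are satisfied iff every original pair is
lemma buildReq_items_iff (pairs : List (String × Int)) (d : PySem.Dict String Int)
    (hnd : d.keys.Nodup) (c : String → Int) :
    (∀ q ∈ (buildReq pairs d).items, q.2 ≤ c q.1)
      ↔ ((∀ p ∈ pairs, p.2 ≤ c p.1) ∧ (∀ q ∈ d.items, q.2 ≤ c q.1)) := by
  induction pairs generalizing d with
  | nil => simp [buildReq]
  | cons p ps ih =>
    simp only [buildReq, List.foldl_cons, List.mem_cons] at *
    rw [ih _ (PySem.Dict.nodup_keys_insert d p.1 _ hnd)]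
    have hins : (∀ q ∈ (d.insert p.1 (max (d.getD p.1 p.2) p.2)).items, q.2 ≤ c q.1)
        ↔ (max (d.getD p.1 p.2) p.2 ≤ c p.1 ∧ ∀ q ∈ d.items, q.1 ≠ p.1 → q.2 ≤ c q.1) := by
      constructor
      · intro h
        refine ⟨h _ (PySem.Dict.mem_items_insert_self d p.1 _), fun q hq hne => ?_⟩
        exact h q ((PySem.Dict.mem_items_insert d p.1 _ q).mpr (Or.inr ⟨hq, hne⟩))
      · rintro ⟨h1, h2⟩ q hq
        rcases (PySem.Dict.mem_items_insert d p.1 _ q).mp hq with rfl | ⟨hq', hne⟩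
        · exact h1
        · exact h2 q hq' hne
    constructor
    · intro h
      have hmax := (hins.mp h.2).1
      refine ⟨fun r hr => ?_, fun q hq => ?_⟩
      · rcases hr with rfl | hr
        · exact le_trans (le_max_right _ _) hmax
        · exact h.1 r hr
      · by_cases hk : q.1 = p.1
        · have hq1 : (p.1, q.2) ∈ d.items := by rw [← hk]; exact hq
          have : d.getD p.1 p.2 = q.2 := PySem.Dict.getD_of_mem_items d hq1 hnd p.2
          calc q.2 = d.getD p.1 p.2 := this.symm
            _ ≤ max (d.getD p.1 p.2) p.2 := le_max_left _ _
            _ ≤ c p.1 := hmax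
            _ = c q.1 := by rw [hk]
        · exact (hins.mp h.2).2 q hq hk
    · rintro ⟨h1, h2⟩
      refine ⟨fun r hr => h1 r (Or.inr hr), hins.mpr ⟨?_, fun q hq _ => h2 q hq⟩⟩
      have hp : p.2 ≤ c p.1 := h1 p (Or.inl rfl)
      rcases hget : d.get? p.1 with _ | v
      · have : d.getD p.1 p.2 = p.2 := by simp [PySem.Dict.getD, hget]
        simp [this, hp]
      · have hv : (p.1, v) ∈ d.items := PySem.Dict.mem_items_of_get?_eq_some d hget
        have : d.getD p.1 p.2 = v := PySem.Dict.getD_of_mem_items d hv hnd p.2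
        simp only [this, max_le_iff]
        exact ⟨h2 _ hv, hp⟩

-- a conditional-increment fold counts the satisfying elements
lemma foldl_count (P : Nat → Prop) [DecidablePred P] (q : Nat → Bool)
    (L : List Nat) (acc : Int) (h : ∀ i ∈ L, P i ↔ q i = true) :
    L.foldl (fun (a : Int) i => if P i then a + 1 else a) acc = acc + (L.countP q : Int) := by
  induction L generalizing acc with
  | nil => simp
  | cons i L ih =>
    simp only [List.foldl_cons, List.countP_cons]
    rw [ih _ (fun j hj => h j (List.mem_cons_of_mem _ hj))]
    by_cases hP : P i
    · rw [if_pos hP]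
      have : q i = true := (h i (List.mem_cons_self)).mp hP
      simp [this]; ring
    · rw [if_neg hP]
      have : q i = false := by
        cases hq : q i
        · rfl
        · exact absurd ((h i List.mem_cons_self).mpr hq) hP
      simp [this]

-- ===== VERDICT (by name: the statement is the Claim_ definition above) =====
theorem solution_spec : Claim_equal_solution := by
  intro want number discount _ hpre
  unfold Spec_solution
  rcases hpre with hlen | hnil
  · unfold solution solution_alt
    rw [loopB_eq discount _ _ _ (by simp), good_eq_map]
    rw [List.count_eq_countP, List.countP_map]
    rw [foldl_count _ (fun j => ((fun j => (buildReq (want.zip number) PySem.Dict.empty).items.all (fun p =>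
        !decide ((prefB p.1 0 discount).getD (min (j + 10) discount.length) 0
          - (prefB p.1 0 discount).getD j 0 < p.2))) j == true))]
    · rw [zero_add]; rfl
    · intro i hi
      have hi' : i < discount.length := List.mem_range.mp hi
      have hslice : PySem.List.slice discount (some (i : Int)) (some ((i : Int) + 10))
          = (discount.drop i).take 10 := by
        have := PySem.List.slice_natCast_add discount i 10
        simpa using this
      simp only [beq_iff_eq]
      rw [hslice, checkA_eq_zero_iff _ _ _ hlen, List.all_eq_true]
      have hreq := buildReq_items_iff (want.zip number) PySem.Dict.empty
        (by rw [PySem.Dict.keys_empty]; exact List.nodup_nil)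
        (fun w => (((discount.drop i).take 10).count w : Int))
      have hempty : ∀ q ∈ (PySem.Dict.empty : PySem.Dict String Int).items,
          q.2 ≤ (((discount.drop i).take 10).count q.1 : Int) := by
        intro q hq
        exact absurd hq (by rw [show (PySem.Dict.empty : PySem.Dict String Int).items = [] from rfl]; simp)
      constructor
      · intro h x hx
        have hxle := hreq.mpr ⟨h, hempty⟩ x hx
        rw [pref_diff x.1 discount i hi']
        simpa [not_lt] using hxle
      · intro h
        refine (hreq.mp ?_).1
        intro q hq
        have hb := h q hq
        rw [pref_diff q.1 discount i hi'] at hb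
        simpa [not_lt] using hb
  · subst hnil
    simp only [solution, solution_alt]
    cases h : (buildReq (want.zip number) PySem.Dict.empty).items <;> simp [loopB]
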